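-- pv_equiv track=rewrite | github.com/RajeevTricel/gemma-seo-agent | agent/run_eval.py | has_bad_phrases
-- ===== SOURCE A (Python) =====
-- def has_bad_phrases(response: str) -> bool:
--     bad_patterns = [
--         "Positionand",
--         "AvgPositionchange",
--         "innoindexed",
--         "guaranteed ranking",
--         "rank #1",
--         "exact cause",
--         "definitely caused by Google",
--     ]
--
--     response_lower = response.lower()
--
--     return any(pattern.lower() in response_lower for pattern in bad_patterns)
-- ===== SOURCE B (Python) =====
-- import re
--
-- _BAD_RE = re.compile("|".join(re.escape(p.lower()) for p in [
--     "Positionand",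
--     "AvgPositionchange",
--     "innoindexed",
--     "guaranteed ranking",
--     "rank #1",
--     "exact cause",
--     "definitely caused by Google",
-- ]))
--
--
-- def has_bad_phrases(response: str) -> bool:
--     return bool(_BAD_RE.search(response.lower()))
-- ===== Notes on version B (the rewrite author's own statement) =====
-- stated objective: idiomatic
-- what changed: B pre-compiles one regular expression alternation of the escaped, lowercased phrases and runs a single search over the lowercased response, instead of a separate per-phrase substring scan.
import Mathlib
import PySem

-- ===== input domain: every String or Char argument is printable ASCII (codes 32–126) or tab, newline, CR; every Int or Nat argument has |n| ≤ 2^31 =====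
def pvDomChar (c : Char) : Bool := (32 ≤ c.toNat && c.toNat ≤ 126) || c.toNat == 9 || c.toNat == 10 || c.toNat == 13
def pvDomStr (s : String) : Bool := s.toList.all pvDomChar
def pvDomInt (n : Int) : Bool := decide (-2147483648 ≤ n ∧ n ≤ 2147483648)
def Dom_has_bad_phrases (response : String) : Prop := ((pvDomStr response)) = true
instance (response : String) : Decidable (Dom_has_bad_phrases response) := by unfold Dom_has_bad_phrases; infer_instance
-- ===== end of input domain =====

-- ===== PORT A =====
-- one honest line: B replaces A's per-phrase substring loop by a single left-to-right scan
-- against the precompiled list of lowered literal alternatives (regex-alternation search).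
def badPatterns : List String :=
  ["Positionand", "AvgPositionchange", "innoindexed", "guaranteed ranking",
   "rank #1", "exact cause", "definitely caused by Google"]

def has_bad_phrases (response : String) : Bool :=
  let response_lower := PySem.Chars.lower response.toList
  badPatterns.any (fun pattern => PySem.Chars.isIn (PySem.Chars.lower pattern.toList) response_lower)

-- ===== PORT B =====
-- the "compiled pattern": the lowered, escaped literal alternatives of the regex alternation
def badAlts : List (List Char) :=
  ["positionand".toList, "avgpositionchange".toList, "innoindexed".toList,
   "guaranteed ranking".toList, "rank #1".toList, "exact cause".toList,
   "definitely caused by google".toList]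

-- regex search of a literal alternation: at each position try every alternative as a prefix
def regexSearch (alts : List (List Char)) (s : List Char) : Bool :=
  match s with
  | [] => alts.any (fun a => a.isPrefixOf ([] : List Char))
  | _ :: rest => alts.any (fun a => a.isPrefixOf s) || regexSearch alts rest

def has_bad_phrases_alt (response : String) : Bool :=
  regexSearch badAlts (PySem.Chars.lower response.toList)

-- ===== PRECONDITION & SPEC =====
def Spec_has_bad_phrases (response : String) (out : Bool) : Prop := out = has_bad_phrases_alt response
instance (response : String) (out : Bool) : Decidable (Spec_has_bad_phrases response out) := by unfold Spec_has_bad_phrases; infer_instance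

-- ===== CLAIM (what is proved, stated in full; the proofs are below) =====
def Claim_equal_has_bad_phrases : Prop := ∀ (response : String), Dom_has_bad_phrases response → Spec_has_bad_phrases response (has_bad_phrases response)

-- ===== LEMMAS AND PROOFS =====
lemma regexSearch_eq_any_isIn (alts : List (List Char)) (s : List Char) :
    regexSearch alts s = alts.any (fun a => PySem.Chars.isIn a s) := by
  induction s with
  | nil =>
      rw [Bool.eq_iff_iff]
      simp [regexSearch, List.isPrefixOf_iff_prefix, PySem.Chars.isIn_iff_infix,
        List.prefix_nil]
  | cons c rest ih =>
      rw [Bool.eq_iff_iff]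
      simp [regexSearch, ih, List.isPrefixOf_iff_prefix, PySem.Chars.isIn_iff_infix,
        List.infix_cons_iff]
      aesop

-- ===== VERDICT (by name: the statement is the Claim_ definition above) =====
lemma badAlts_eq :
    badPatterns.map (fun p => PySem.Chars.lower p.toList) = badAlts := by decide

theorem has_bad_phrases_spec : Claim_equal_has_bad_phrases := by
  intro response _
  unfold Spec_has_bad_phrases has_bad_phrases has_bad_phrases_alt
  rw [regexSearch_eq_any_isIn, ← badAlts_eq, List.any_map]
  rfl
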